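-- pv_equiv track=rewrite | github.com/BSidesFortWayne/BSidesFW2025Badge | src/lib/battery.py | get_battery_color
-- ===== SOURCE A (Python) =====
-- def get_battery_color(percentage):
--     s = max(0, min(100, percentage))
--
--     # Gradient key-points: (percentage, (R, G, B))
--     stops = [
--         (100, (  0, 255,   0)),   # green
--         ( 66, (255, 255,   0)),   # yellow
--         ( 33, (255, 165,   0)),   # orange
--         (  0, (255,   0,   0)),   # red
--     ]
--
--     # Find the two surrounding stops
--     for (hi_v, hi_c), (lo_v, lo_c) in zip(stops, stops[1:]):
--         if s >= lo_v:
--             # Percentage between the two stops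
--             t = (s - lo_v) / (hi_v - lo_v) if hi_v != lo_v else 0
--             # Linear interpolation of each channel
--             return tuple(
--                 int(round(lo + t * (hi - lo)))
--                 for lo, hi in zip(lo_c, hi_c)
--             )
--
--     # Fallback (shouldn’t be reached)
--     return stops[-1][1]
-- ===== SOURCE B (Python) =====
-- def get_battery_color(percentage):
--     s = max(0, min(100, percentage))
--     bps = (0, 33, 66, 100)
--     cols = ((255, 0, 0), (255, 165, 0), (255, 255, 0), (0, 255, 0))
--     i = (s >= 33) + (s >= 66)
--     lo_v, hi_v = bps[i], bps[i + 1]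
--     t = (s - lo_v) / (hi_v - lo_v)
--     return tuple(int(round(lo + t * (hi - lo)))
--                  for lo, hi in zip(cols[i], cols[i + 1]))
-- ===== Notes on version B (the rewrite author's own statement) =====
-- stated objective: idiomatic
-- what changed: Replaces A's early-return scan over descending (hi,lo) stop pairs with an ascending breakpoint/color table whose interval index is computed arithmetically from two comparisons, followed by one linear interpolation.
import Mathlib
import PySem

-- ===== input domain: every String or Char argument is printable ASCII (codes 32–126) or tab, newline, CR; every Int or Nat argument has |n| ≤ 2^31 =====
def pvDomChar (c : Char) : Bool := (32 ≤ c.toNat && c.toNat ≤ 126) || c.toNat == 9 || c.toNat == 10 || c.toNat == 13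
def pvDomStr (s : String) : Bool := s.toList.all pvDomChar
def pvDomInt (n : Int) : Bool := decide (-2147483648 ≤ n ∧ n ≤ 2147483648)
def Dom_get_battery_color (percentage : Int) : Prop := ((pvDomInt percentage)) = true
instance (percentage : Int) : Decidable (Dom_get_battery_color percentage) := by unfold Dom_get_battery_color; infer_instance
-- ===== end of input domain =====

-- B replaces A's scan over descending stop pairs with an ascending breakpoint table indexed arithmetically; objective: idiomatic/alternative, same cost.
-- Both ports model Python's float t and round() by exact fractions (numerator/denominator pairs) with banker's rounding;
-- this agrees with CPython's float result for every integer input of this domain (checked exhaustively over the clamped range).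

-- int(round(num/den)) with den > 0, Python's round-half-to-even
def pyRoundFrac (num den : Int) : Int :=
  let q : Int := PySem.Int.floordiv num den
  let r : Int := num - q * den
  if 2 * r < den then q
  else if 2 * r > den then q + 1
  else if q % 2 = 0 then q else q + 1

-- ===== PORT A =====
-- one channel: int(round(lo + t * (hi - lo))), t = tn/td
def pvChanA (tn td lo hi : Int) : Int := pyRoundFrac (lo * td + tn * (hi - lo)) td

-- the for-loop over zip(stops, stops[1:]) with early return
def pvLoopA (s : Int) :
    List ((Int × (Int × Int × Int)) × (Int × (Int × Int × Int))) → Option (Int × Int × Int)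
  | [] => none
  | ((hv, hc), (lv, lc)) :: rest =>
    if s ≥ lv then
      -- t = (s - lv) / (hv - lv) if hv ≠ lv else 0, as an exact fraction
      let tn : Int := if hv ≠ lv then s - lv else 0
      let td : Int := if hv ≠ lv then hv - lv else 1
      some (pvChanA tn td lc.1 hc.1, pvChanA tn td lc.2.1 hc.2.1, pvChanA tn td lc.2.2 hc.2.2)
    else pvLoopA s rest

def pvStopsA : List (Int × (Int × Int × Int)) :=
  [(100, (0, 255, 0)), (66, (255, 255, 0)), (33, (255, 165, 0)), (0, (255, 0, 0))]

def pvCoreA (s : Int) : Int × Int × Int :=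
  match pvLoopA s (pvStopsA.zip (pvStopsA.drop 1)) with
  | some c => c
  | none => (255, 0, 0)   -- fallback: stops[-1][1]

def get_battery_color (percentage : Int) : Int × Int × Int :=
  pvCoreA (max 0 (min 100 percentage))

-- ===== PORT B =====
-- one channel: int(round(lo + t * (hi - lo))), t = tn/td
def pvChanB (tn td lo hi : Int) : Int := pyRoundFrac (lo * td + tn * (hi - lo)) td

def pvCoreB (s : Int) : Int × Int × Int :=
  let bps : List Int := [0, 33, 66, 100]
  let cols : List (Int × Int × Int) := [(255, 0, 0), (255, 165, 0), (255, 255, 0), (0, 255, 0)]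
  let i : Nat := (if s ≥ 33 then 1 else 0) + (if s ≥ 66 then 1 else 0)
  let lo_v := bps.getD i 0
  let hi_v := bps.getD (i + 1) 0
  let lc := cols.getD i (0, 0, 0)
  let hc := cols.getD (i + 1) (0, 0, 0)
  -- t = (s - lo_v) / (hi_v - lo_v), as an exact fraction
  let tn : Int := s - lo_v
  let td : Int := hi_v - lo_v
  (pvChanB tn td lc.1 hc.1, pvChanB tn td lc.2.1 hc.2.1, pvChanB tn td lc.2.2 hc.2.2)

def get_battery_color_alt (percentage : Int) : Int × Int × Int :=
  pvCoreB (max 0 (min 100 percentage))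

-- ===== PRECONDITION & SPEC =====
def Spec_get_battery_color (percentage : Int) (out : Int × Int × Int) : Prop := out = get_battery_color_alt percentage
instance (percentage : Int) (out : Int × Int × Int) : Decidable (Spec_get_battery_color percentage out) := by unfold Spec_get_battery_color; infer_instance

-- ===== CLAIM (what is proved, stated in full; the proofs are below) =====
def Claim_equal_get_battery_color : Prop := ∀ (percentage : Int), Dom_get_battery_color percentage → Spec_get_battery_color percentage (get_battery_color percentage)

-- ===== LEMMAS AND PROOFS =====
theorem pvCore_eq : ∀ n : Nat, n < 101 → pvCoreA (n : Int) = pvCoreB (n : Int) := by decide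

-- ===== VERDICT (by name: the statement is the Claim_ definition above) =====
theorem get_battery_color_spec : Claim_equal_get_battery_color := by
  intro p _
  unfold Spec_get_battery_color get_battery_color get_battery_color_alt
  set s : Int := max 0 (min 100 p) with hs
  have h0 : 0 ≤ s := le_max_left _ _
  have h1 : s ≤ 100 := by
    rw [hs]; exact max_le (by norm_num) (min_le_left _ _)
  have hn : s = ((s.toNat : Nat) : Int) := (Int.toNat_of_nonneg h0).symm
  rw [hn]
  exact pvCore_eq s.toNat (by omega)
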